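-- pv_equiv track=rewrite | github.com/kyoon-codes/caliparilab | untitled0.py | identify_and_sort_lick_bouts
-- ===== SOURCE A (Python) =====
-- def identify_and_sort_lick_bouts(lick_timestamps, max_interval):
--     bouts = []
--     current_bout = []
--     for i in range(len(lick_timestamps)):
--         if not current_bout:
--             current_bout.append(lick_timestamps[i])
--         else:
--             if lick_timestamps[i] - current_bout[-1] <= max_interval:
--                 current_bout.append(lick_timestamps[i])
--             else:
--                 bouts.append(current_bout)
--                 current_bout = [lick_timestamps[i]]
--     if current_bout:
--         bouts.append(current_bout)
--     # Calculate the length of each bout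
--     bout_lengths = [(len(bout), bout) for bout in bouts]
--     # Sort bouts by their length
--     sorted_bouts = sorted(bout_lengths, key=lambda x: x[0])
--     return sorted_bouts
-- ===== SOURCE B (Python) =====
-- def identify_and_sort_lick_bouts(lick_timestamps, max_interval):
--     # Cut whole bouts off the front of the list, bucketing each bout under its
--     # length; emit buckets in increasing length order (stable bucket sort).
--     buckets = {}
--     rest = lick_timestamps
--     while rest:
--         k = 1
--         while k < len(rest) and rest[k] - rest[k - 1] <= max_interval:
--             k += 1
--         buckets.setdefault(k, []).append(rest[:k])
--         rest = rest[k:]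
--     return [(ln, b) for ln in sorted(buckets) for b in buckets[ln]]
-- ===== Notes on version B (the rewrite author's own statement) =====
-- stated objective: alternative
-- what changed: B never builds a running current-bout accumulator and never comparison-sorts the (length, bout) pairs: it repeatedly cuts a whole bout off the front of the list (inner scan finds the cut index, slicing yields the bout), buckets each bout in a dict keyed by its length, and emits the buckets in increasing key order (a stable bucket sort over distinct lengths), which reproduces Python's stable sorted(..., key=len) exactly.
import Mathlib
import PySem

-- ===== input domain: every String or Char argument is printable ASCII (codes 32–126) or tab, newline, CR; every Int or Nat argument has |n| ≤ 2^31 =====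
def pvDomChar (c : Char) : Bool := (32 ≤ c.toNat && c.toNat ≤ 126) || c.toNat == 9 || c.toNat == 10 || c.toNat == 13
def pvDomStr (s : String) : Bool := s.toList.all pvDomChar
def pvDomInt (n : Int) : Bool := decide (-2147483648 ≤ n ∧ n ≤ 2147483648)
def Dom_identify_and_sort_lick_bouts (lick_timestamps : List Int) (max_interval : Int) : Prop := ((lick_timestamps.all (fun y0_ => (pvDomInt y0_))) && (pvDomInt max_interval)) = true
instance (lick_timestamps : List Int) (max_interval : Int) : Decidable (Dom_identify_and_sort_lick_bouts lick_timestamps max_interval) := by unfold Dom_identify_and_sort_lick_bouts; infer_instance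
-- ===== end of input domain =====

-- B cuts whole bouts off the front of the list and bucket-sorts them by length in a dict, instead of A's element-wise accumulator pass followed by a comparison sort of the pairs; alternative algorithm, same result.

-- ===== PORT A =====
def identify_and_sort_lick_bouts (lick_timestamps : List Int) (max_interval : Int) : List (Int × List Int) :=
  let st := lick_timestamps.foldl (fun (st : List (List Int) × List Int) t =>
    if st.2 = [] then (st.1, st.2 ++ [t])
    else if t - PySem.List.pyGetD st.2 (-1) 0 ≤ max_interval then (st.1, st.2 ++ [t])
    else (st.1 ++ [st.2], [t])) ([], [])
  let bouts := if st.2 ≠ [] then st.1 ++ [st.2] else st.1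
  let bout_lengths := bouts.map (fun b => ((b.length : Int), b))
  PySem.List.sorted bout_lengths (fun x => x.1) false

-- ===== PORT B =====
-- inner while: k = 1; while k < len(rest) and rest[k] - rest[k-1] <= max_interval: k += 1
def pvInnerK (m : Int) (rest : List Int) (k : Nat) : Nat :=
  if h : k < rest.length ∧ PySem.List.pyGetD rest (k : Int) 0 - PySem.List.pyGetD rest ((k : Int) - 1) 0 ≤ m then
    pvInnerK m rest (k + 1)
  else k
termination_by rest.length - k
decreasing_by have := h.1; omega

lemma le_pvInnerK (m : Int) (rest : List Int) (k : Nat) : k ≤ pvInnerK m rest k := by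
  rw [pvInnerK]
  by_cases h : k < rest.length ∧ PySem.List.pyGetD rest (k : Int) 0 - PySem.List.pyGetD rest ((k : Int) - 1) 0 ≤ m
  · rw [dif_pos h]; have := le_pvInnerK m rest (k + 1); omega
  · rw [dif_neg h]
termination_by rest.length - k
decreasing_by have := h.1; omega

-- outer while: cut rest[:k] off the front, bucket it under key k
def pvFillBuckets (m : Int) (rest : List Int) (d : PySem.Dict Int (List (List Int))) : PySem.Dict Int (List (List Int)) :=
  if _h : rest = [] then d
  else
    pvFillBuckets m (PySem.List.slice rest (some ((pvInnerK m rest 1 : Nat) : Int)) none)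
      (d.modify ((pvInnerK m rest 1 : Nat) : Int) []
        (fun v => v ++ [PySem.List.slice rest none (some ((pvInnerK m rest 1 : Nat) : Int))]))
termination_by rest.length
decreasing_by
  rw [PySem.List.slice_from_natCast]
  have h1 := le_pvInnerK m rest 1
  have h2 : 0 < rest.length := List.length_pos_of_ne_nil _h
  simp [List.length_drop]
  omega

def identify_and_sort_lick_bouts_alt (lick_timestamps : List Int) (max_interval : Int) : List (Int × List Int) :=
  let buckets := pvFillBuckets max_interval lick_timestamps PySem.Dict.empty
  (PySem.List.sorted buckets.keys (fun k => k) false).flatMap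
    (fun ln => (buckets.getD ln []).map (fun b => (ln, b)))

-- ===== PRECONDITION & SPEC =====
def Spec_identify_and_sort_lick_bouts (lick_timestamps : List Int) (max_interval : Int) (out : List (Int × List Int)) : Prop := out = identify_and_sort_lick_bouts_alt lick_timestamps max_interval
instance (lick_timestamps : List Int) (max_interval : Int) (out : List (Int × List Int)) : Decidable (Spec_identify_and_sort_lick_bouts lick_timestamps max_interval out) := by unfold Spec_identify_and_sort_lick_bouts; infer_instance

-- ===== CLAIM (what is proved, stated in full; the proofs are below) =====
def Claim_equal_identify_and_sort_lick_bouts : Prop := ∀ (lick_timestamps : List Int) (max_interval : Int), Dom_identify_and_sort_lick_bouts lick_timestamps max_interval → Spec_identify_and_sort_lick_bouts lick_timestamps max_interval (identify_and_sort_lick_bouts lick_timestamps max_interval)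

-- ===== LEMMAS AND PROOFS =====

lemma pvFillBuckets_nil (m : Int) (d : PySem.Dict Int (List (List Int))) :
    pvFillBuckets m [] d = d := by
  rw [pvFillBuckets.eq_def]
  simp

lemma pvFillBuckets_cons (m : Int) (x : Int) (xs : List Int) (d : PySem.Dict Int (List (List Int))) :
    pvFillBuckets m (x :: xs) d
      = pvFillBuckets m (PySem.List.slice (x :: xs) (some ((pvInnerK m (x :: xs) 1 : Nat) : Int)) none)
          (d.modify ((pvInnerK m (x :: xs) 1 : Nat) : Int) []
            (fun v => v ++ [PySem.List.slice (x :: xs) none (some ((pvInnerK m (x :: xs) 1 : Nat) : Int))])) := by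
  rw [pvFillBuckets.eq_def]
  simp


-- `contSplit m prev xs = (rest of the bout containing prev, remaining timestamps)`
def contSplit (m prev : Int) : List Int → List Int × List Int
  | [] => ([], [])
  | x :: xs =>
    if x - prev ≤ m then
      let r := contSplit m x xs; (x :: r.1, r.2)
    else ([], x :: xs)

lemma contSplit_snd_length (m prev : Int) : ∀ xs : List Int, (contSplit m prev xs).2.length ≤ xs.length := by
  intro xs
  induction xs generalizing prev with
  | nil => simp [contSplit]
  | cons x xs ih =>
    by_cases h : x - prev ≤ m
    · simp only [contSplit, if_pos h]; exact le_trans (ih x) (by simp)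
    · simp only [contSplit]; rw [if_neg h]

lemma contSplit_append (m prev : Int) : ∀ xs : List Int, (contSplit m prev xs).1 ++ (contSplit m prev xs).2 = xs := by
  intro xs
  induction xs generalizing prev with
  | nil => simp [contSplit]
  | cons x xs ih =>
    by_cases h : x - prev ≤ m
    · simp only [contSplit, if_pos h, List.cons_append, List.cons.injEq, true_and]; exact ih x
    · simp only [contSplit]; rw [if_neg h]; simp

-- the common grouping specification
def splitSpec (m : Int) : List Int → List (List Int)
  | [] => []
  | x :: xs => (x :: (contSplit m x xs).1) :: splitSpec m (contSplit m x xs).2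
termination_by l => l.length
decreasing_by have := contSplit_snd_length m x xs; simp; omega

lemma splitSpec_nil (m : Int) : splitSpec m [] = [] := by
  rw [splitSpec.eq_def]

lemma splitSpec_cons (m x : Int) (xs : List Int) :
    splitSpec m (x :: xs) = (x :: (contSplit m x xs).1) :: splitSpec m (contSplit m x xs).2 := by
  rw [splitSpec.eq_def]

def stepA (m : Int) : List (List Int) × List Int → Int → List (List Int) × List Int :=
  fun st t =>
  if st.2 = [] then (st.1, st.2 ++ [t])
  else if t - PySem.List.pyGetD st.2 (-1) 0 ≤ m then (st.1, st.2 ++ [t])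
  else (st.1 ++ [st.2], [t])

lemma foldA_eq (m : Int) : ∀ (xs : List Int) (bouts : List (List Int)) (cur : List Int) (prev : Int),
    cur ≠ [] → PySem.List.pyGetD cur (-1) 0 = prev →
    (let st := xs.foldl (stepA m) (bouts, cur)
     if st.2 ≠ [] then st.1 ++ [st.2] else st.1)
      = bouts ++ (cur ++ (contSplit m prev xs).1) :: splitSpec m (contSplit m prev xs).2 := by
  intro xs
  induction xs with
  | nil =>
    intro bouts cur prev hne _
    simp [contSplit, splitSpec_nil, hne]
  | cons x xs ih =>
    intro bouts cur prev hne hlast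
    simp only [List.foldl_cons]
    have hstep : stepA m (bouts, cur) x =
        if x - prev ≤ m then (bouts, cur ++ [x]) else (bouts ++ [cur], [x]) := by
      simp [stepA, hne, hlast]
    by_cases h : x - prev ≤ m
    · rw [hstep]; simp only [if_pos h]
      rw [ih bouts (cur ++ [x]) x (by simp) (PySem.List.pyGetD_neg_one_append_singleton ..)]
      simp [contSplit, h, List.append_assoc]
    · rw [hstep]; simp only [if_neg h]
      rw [ih (bouts ++ [cur]) [x] x (by simp) (by simp [PySem.List.pyGetD, PySem.List.pyGet?, PySem.List.pyIdx?])]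
      simp only [contSplit]
      rw [if_neg h, splitSpec_cons]
      simp [List.append_assoc]

lemma boutsA_eq (m : Int) (ts : List Int) :
    (let st := ts.foldl (stepA m) ([], [])
     if st.2 ≠ [] then st.1 ++ [st.2] else st.1) = splitSpec m ts := by
  cases ts with
  | nil => simp [splitSpec_nil]
  | cons x xs =>
    have h1 : stepA m (([], []) : List (List Int) × List Int) x = ([], [x]) := by simp [stepA]
    simp only [List.foldl_cons, h1]
    rw [foldA_eq m xs [] [x] x (by simp) (by simp [PySem.List.pyGetD, PySem.List.pyGet?, PySem.List.pyIdx?])]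
    rw [splitSpec_cons]
    simp

-- B side: the inner while loop computes the first-bout cut index
lemma getD_append_self (pre : List Int) (prev : Int) (xs : List Int) (d : Int) :
    (pre ++ prev :: xs).getD pre.length d = prev := by
  simp [List.getD]

lemma pvInnerK_eq (m : Int) : ∀ (xs pre : List Int) (prev : Int),
    pvInnerK m (pre ++ prev :: xs) (pre.length + 1) = pre.length + 1 + (contSplit m prev xs).1.length := by
  intro xs
  induction xs with
  | nil =>
    intro pre prev
    rw [pvInnerK, dif_neg (by simp)]
    simp [contSplit]
  | cons y ys ih =>
    intro pre prev
    have hy : PySem.List.pyGetD (pre ++ prev :: y :: ys) ((pre.length + 1 : Nat) : Int) 0 = y := by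
      have hre : pre ++ prev :: y :: ys = (pre ++ [prev]) ++ y :: ys := by simp
      have hlen : pre.length + 1 = (pre ++ [prev]).length := by simp
      rw [PySem.List.pyGetD_natCast, hre, hlen, getD_append_self]
    have hprev : PySem.List.pyGetD (pre ++ prev :: y :: ys) (((pre.length + 1 : Nat) : Int) - 1) 0 = prev := by
      have h1 : (((pre.length + 1 : Nat) : Int) - 1) = ((pre.length : Nat) : Int) := by push_cast; ring
      rw [h1, PySem.List.pyGetD_natCast, getD_append_self]
    by_cases h : y - prev ≤ m
    · rw [pvInnerK, dif_pos ⟨by simp only [List.length_append, List.length_cons]; omega,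
        by rw [hy, hprev]; exact h⟩]
      have hre : pre ++ prev :: y :: ys = (pre ++ [prev]) ++ y :: ys := by simp
      have h2 : pre.length + 1 + 1 = (pre ++ [prev]).length + 1 := by simp
      rw [hre, h2, ih (pre ++ [prev]) y]
      simp only [contSplit]
      rw [if_pos h]
      simp only [List.length_append, List.length_cons, List.length_nil]
      omega
    · rw [pvInnerK, dif_neg (fun hc => h (by rw [hy, hprev] at hc; exact hc.2))]
      simp only [contSplit]
      rw [if_neg h]
      simp

lemma pvInnerK_one (m prev : Int) (xs : List Int) :
    pvInnerK m (prev :: xs) 1 = 1 + (contSplit m prev xs).1.length := by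
  have := pvInnerK_eq m xs [] prev
  simpa using this

def bucketStep : PySem.Dict Int (List (List Int)) → Int × List Int → PySem.Dict Int (List (List Int)) :=
  fun d p => d.modify p.1 [] (fun v => v ++ [p.2])

lemma pvFillBuckets_eq (m : Int) : ∀ (n : Nat) (rest : List Int) (d : PySem.Dict Int (List (List Int))),
    rest.length ≤ n →
    pvFillBuckets m rest d
      = ((splitSpec m rest).map (fun b => ((b.length : Int), b))).foldl bucketStep d := by
  intro n
  induction n with
  | zero =>
    intro rest d hlen
    have : rest = [] := by cases rest <;> simp_all
    subst this
    rw [pvFillBuckets_nil]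
    simp [splitSpec_nil]
  | succ n ih =>
    intro rest d hlen
    cases rest with
    | nil => rw [pvFillBuckets_nil]; simp [splitSpec_nil]
    | cons x xs =>
      rw [pvFillBuckets_cons]
      have hk : pvInnerK m (x :: xs) 1 = 1 + (contSplit m x xs).1.length := pvInnerK_one m x xs
      have hsplit := contSplit_append m x xs
      have htake : PySem.List.slice (x :: xs) none (some ((pvInnerK m (x :: xs) 1 : Nat) : Int))
          = x :: (contSplit m x xs).1 := by
        rw [PySem.List.slice_to_natCast, hk]
        have : x :: xs = (x :: (contSplit m x xs).1) ++ (contSplit m x xs).2 := by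
          simp [hsplit]
        rw [this, List.take_append_of_le_length (by simp [Nat.add_comm])]
        rw [List.take_of_length_le (by simp [Nat.add_comm])]
      have hdrop : PySem.List.slice (x :: xs) (some ((pvInnerK m (x :: xs) 1 : Nat) : Int)) none
          = (contSplit m x xs).2 := by
        rw [PySem.List.slice_from_natCast, hk]
        have : x :: xs = (x :: (contSplit m x xs).1) ++ (contSplit m x xs).2 := by
          simp [hsplit]
        rw [this, List.drop_append_of_le_length (by simp [Nat.add_comm])]
        rw [List.drop_of_length_le (by simp [Nat.add_comm]), List.nil_append]
      rw [htake, hdrop]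
      have hlen2 : (contSplit m x xs).2.length ≤ n := by
        have := contSplit_snd_length m x xs
        simp at hlen; omega
      rw [ih (contSplit m x xs).2 _ hlen2]
      rw [splitSpec_cons]
      simp only [List.map_cons, List.foldl_cons]
      congr 1
      simp [bucketStep, hk, add_comm]

-- a block keyed by c re-paired with c is itself
lemma filter_map_repair (bl : List (Int × List Int)) (c : Int) :
    ((bl.filter (fun p => p.1 == c)).map (fun p => (c, p.2))) = bl.filter (fun p => p.1 == c) := by
  have h : ∀ p ∈ bl.filter (fun p => p.1 == c), (c, p.2) = p := by
    intro p hp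
    have := List.of_mem_filter hp
    have h1 : p.1 = c := by simpa using this
    cases p; simp_all
  calc ((bl.filter (fun p => p.1 == c)).map (fun p => (c, p.2)))
      = (bl.filter (fun p => p.1 == c)).map id := List.map_congr_left h
    _ = _ := by simp

-- stable insertion keeps per-key blocks: insert behind all equal keys
lemma insertBy_filter (x : Int × List Int) (k : Int) :
    ∀ ys : List (Int × List Int), ys.Pairwise (fun a b => a.1 ≤ b.1) →
    (PySem.List.insertBy (fun a b => decide (a.1 < b.1)) x ys).filter (fun p => p.1 == k)
      = ys.filter (fun p => p.1 == k) ++ (if x.1 == k then [x] else []) := by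
  intro ys
  induction ys with
  | nil => intro _; simp [PySem.List.insertBy]; by_cases h : x.1 = k <;> simp [h]
  | cons y ys ih =>
    intro hp
    by_cases h : x.1 < y.1
    · rw [PySem.List.insertBy, if_pos (by simpa using h)]
      by_cases hk : x.1 = k
      · subst hk
        have hfy : (y :: ys).filter (fun p => p.1 == x.1) = [] := by
          rw [List.filter_eq_nil_iff]
          intro z hz
          rcases List.mem_cons.mp hz with hz | hz
          · subst hz; simp; omega
          · have := (List.pairwise_cons.mp hp).1 z hz; simp; omega
        rw [List.filter_cons_of_pos (by simp), hfy]
        simp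
      · have hxk : (x.1 == k) = false := by simpa using hk
        simp [List.filter_cons, hxk]
    · rw [PySem.List.insertBy, if_neg (by simpa using h)]
      have ih2 := ih (List.pairwise_cons.mp hp).2
      by_cases hy : y.1 = k
      · rw [List.filter_cons_of_pos (by simpa using hy), List.filter_cons_of_pos (by simpa using hy), ih2]
        simp
      · rw [List.filter_cons_of_neg (by simpa using hy), List.filter_cons_of_neg (by simpa using hy), ih2]

-- stability of Python's sorted: per-key blocks are untouched
lemma sorted_filter_key (k : Int) : ∀ bl : List (Int × List Int),
    (PySem.List.sorted bl (fun p => p.1) false).filter (fun p => p.1 == k)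
      = bl.filter (fun p => p.1 == k) := by
  intro bl
  induction bl using List.reverseRecOn with
  | nil => simp [PySem.List.sorted]
  | append_singleton l x ih =>
    have hs : PySem.List.sorted (l ++ [x]) (fun p => p.1) false
        = PySem.List.insertBy (fun a b => decide (a.1 < b.1)) x (PySem.List.sorted l (fun p => p.1) false) := by
      simp [PySem.List.sorted, List.foldl_append]
    rw [hs, insertBy_filter x k _ (PySem.List.sorted_pairwise l (fun p => p.1))]
    rw [ih, List.filter_append]
    by_cases h : x.1 = k <;> simp [h]

-- two key-sorted lists with identical per-key blocks are equal
lemma eq_of_pairwise_of_filter_eq : ∀ (ys zs : List (Int × List Int)),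
    ys.Pairwise (fun a b => a.1 ≤ b.1) → zs.Pairwise (fun a b => a.1 ≤ b.1) →
    (∀ k, ys.filter (fun p => p.1 == k) = zs.filter (fun p => p.1 == k)) → ys = zs := by
  intro ys
  induction ys with
  | nil =>
    intro zs _ _ hf
    cases zs with
    | nil => rfl
    | cons z zs =>
      have := hf z.1
      simp at this
  | cons y ys ih =>
    intro zs hy hz hf
    cases zs with
    | nil =>
      have := hf y.1
      simp at this
    | cons z zs =>
      have hmemy : y ∈ z :: zs := by
        have h1 := hf y.1
        have h2 : y ∈ (z :: zs).filter (fun p => p.1 == y.1) := by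
          rw [← h1]; simp
        exact List.mem_of_mem_filter h2
      have hmemz : z ∈ y :: ys := by
        have h1 := hf z.1
        have h2 : z ∈ (y :: ys).filter (fun p => p.1 == z.1) := by
          rw [h1]; simp
        exact List.mem_of_mem_filter h2
      have hle1 : z.1 ≤ y.1 := by
        rcases List.mem_cons.mp hmemy with h | h
        · rw [h]
        · exact (List.pairwise_cons.mp hz).1 y h
      have hle2 : y.1 ≤ z.1 := by
        rcases List.mem_cons.mp hmemz with h | h
        · rw [h]
        · exact (List.pairwise_cons.mp hy).1 z h
      have hkey : y.1 = z.1 := le_antisymm hle2 hle1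
      have hhead := hf y.1
      rw [List.filter_cons_of_pos (by simp), List.filter_cons_of_pos (by simp [hkey])] at hhead
      have hyz : y = z := (List.cons_eq_cons.mp hhead).1
      have htail : ys.filter (fun p => p.1 == y.1) = zs.filter (fun p => p.1 == y.1) :=
        (List.cons_eq_cons.mp hhead).2
      have hf2 : ∀ k, ys.filter (fun p => p.1 == k) = zs.filter (fun p => p.1 == k) := by
        intro k
        by_cases hk : k = y.1
        · subst hk; exact htail
        · have hthis := hf k
          rw [List.filter_cons_of_neg (by simp; omega),
            List.filter_cons_of_neg (by simp [← hkey]; omega)] at hthis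
          exact hthis
      rw [hyz, ih zs (List.pairwise_cons.mp hy).2 (List.pairwise_cons.mp hz).2 hf2]

lemma flatMap_ite_eq {α : Type} (k : Int) (v : List α) :
    ∀ cs : List Int, cs.Nodup →
    (cs.flatMap (fun c => if c = k then v else [])) = if k ∈ cs then v else [] := by
  intro cs
  induction cs with
  | nil => simp
  | cons c cs ih =>
    intro hnd
    rw [List.flatMap_cons, ih hnd.of_cons]
    by_cases hc : c = k
    · subst hc
      have : c ∉ cs := (List.nodup_cons.mp hnd).1
      simp [this]
    · by_cases hm : k ∈ cs <;> simp [hc, hm, Ne.symm hc]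

-- the bucket output (key blocks listed in increasing key order) IS the stable sort
lemma sorted_eq_blocks (bl : List (Int × List Int)) :
    PySem.List.sorted bl (fun p => p.1) false
      = (PySem.List.sorted (PySem.Set.ofList (bl.map (fun p => p.1))) (fun k => k) false).flatMap
          (fun c => bl.filter (fun p => p.1 == c)) := by
  have hks : (PySem.List.sorted (PySem.Set.ofList (bl.map (fun p => p.1))) (fun k => k) false).Pairwise (· < ·) :=
    PySem.List.sorted_ofList_pairwise_lt _
  have hnd : (PySem.List.sorted (PySem.Set.ofList (bl.map (fun p => p.1))) (fun k => k) false).Nodup :=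
    hks.nodup
  have hmem : ∀ k : Int, (k ∈ PySem.List.sorted (PySem.Set.ofList (bl.map (fun p => p.1))) (fun k => k) false)
      ↔ k ∈ bl.map (fun p => p.1) := by
    intro k
    rw [PySem.List.mem_sorted]
    exact PySem.Set.mem_ofList ..
  apply eq_of_pairwise_of_filter_eq
  · exact PySem.List.sorted_pairwise bl (fun p => p.1)
  · rw [List.flatMap_def, List.pairwise_flatten]
    constructor
    · intro l hl
      simp only [List.mem_map] at hl
      obtain ⟨c, _, rfl⟩ := hl
      apply List.pairwise_of_forall_mem_list
      intro a ha b hb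
      have h1 : a.1 = c := by simpa using List.of_mem_filter ha
      have h2 : b.1 = c := by simpa using List.of_mem_filter hb
      omega
    · rw [List.pairwise_map]
      apply List.Pairwise.imp_of_mem _ hks
      intro c1 c2 _ _ hlt p hp q hq
      have h1 : p.1 = c1 := by simpa using List.of_mem_filter hp
      have h2 : q.1 = c2 := by simpa using List.of_mem_filter hq
      omega
  · intro k
    rw [sorted_filter_key, List.filter_flatMap]
    have hblocks : ∀ c : Int, (bl.filter (fun p => p.1 == c)).filter (fun p => p.1 == k)
        = if c = k then bl.filter (fun p => p.1 == k) else [] := by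
      intro c
      by_cases hc : c = k
      · subst hc; simp [List.filter_filter]
      · rw [if_neg hc, List.filter_eq_nil_iff]
        intro p hp
        have h1 : p.1 = c := by simpa using List.of_mem_filter hp
        simp [h1, hc]
    have hcg : ((PySem.List.sorted (PySem.Set.ofList (bl.map (fun p => p.1))) (fun k => k) false).flatMap
            fun c => (bl.filter (fun p => p.1 == c)).filter (fun p => p.1 == k))
        = ((PySem.List.sorted (PySem.Set.ofList (bl.map (fun p => p.1))) (fun k => k) false).flatMap
            fun c => if c = k then bl.filter (fun p => p.1 == k) else []) := by
      rw [List.flatMap_def, List.flatMap_def]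
      exact congrArg List.flatten (List.map_congr_left (fun c _ => hblocks c))
    rw [hcg, flatMap_ite_eq k _ _ hnd]
    by_cases hm : k ∈ bl.map (fun p => p.1)
    · rw [if_pos ((hmem k).mpr hm)]
    · rw [if_neg (fun hc => hm ((hmem k).mp hc))]
      rw [List.filter_eq_nil_iff]
      intro p hp hpk
      exact hm (List.mem_map.mpr ⟨p, hp, by simpa using hpk⟩)

-- ===== VERDICT (by name: the statement is the Claim_ definition above) =====
theorem identify_and_sort_lick_bouts_spec : Claim_equal_identify_and_sort_lick_bouts := by
  intro ts m _
  show identify_and_sort_lick_bouts ts m = identify_and_sort_lick_bouts_alt ts m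
  have hA := boutsA_eq m ts
  unfold stepA at hA
  simp only [identify_and_sort_lick_bouts, identify_and_sort_lick_bouts_alt]
  rw [hA]
  set bl := (splitSpec m ts).map (fun b => ((b.length : Int), b)) with hbl
  have hfill := pvFillBuckets_eq m ts.length ts PySem.Dict.empty (le_refl _)
  unfold bucketStep at hfill
  rw [hfill]
  have hkeys : ((bl.foldl (fun d p => d.modify p.1 [] (fun v => v ++ [p.2])) PySem.Dict.empty)).keys
      = PySem.Set.ofList (bl.map (fun p => p.1)) := by
    rw [PySem.Dict.keys_foldl_modify_key bl (fun p => p.1) [] (fun _ p v => v ++ [p.2])]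
    simp [PySem.Set.update, PySem.Set.ofList_eq_foldl, PySem.Dict.keys, PySem.Dict.empty]
  have hgetD : ∀ c : Int, ((bl.foldl (fun d p => d.modify p.1 [] (fun v => v ++ [p.2])) PySem.Dict.empty)).getD c []
      = (bl.filter (fun p => p.1 == c)).map (fun p => p.2) := by
    intro c
    rw [PySem.Dict.getD_foldl_modify_append]
    simp
  rw [hkeys]
  have hstep : ∀ c : Int, (((bl.foldl (fun d p => d.modify p.1 [] (fun v => v ++ [p.2])) PySem.Dict.empty)).getD c []).map (fun b => (c, b))
      = bl.filter (fun p => p.1 == c) := by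
    intro c
    rw [hgetD c, List.map_map]
    exact filter_map_repair bl c
  rw [sorted_eq_blocks bl]
  rw [List.flatMap_def, List.flatMap_def]
  exact congrArg List.flatten (List.map_congr_left (fun c _ => (hstep c).symm))
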